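-- pv_equiv track=rewrite | github.com/lamperi/aoc | 2025/9/solve.py | is_contained_inside_red_and_green
-- ===== SOURCE A (Python) =====
-- def is_contained_inside_red_and_green(t1, t2, tiles):
--     xs = t1[1], t2[1]
--     ys = t1[0], t2[0]
--     x0 = min(xs)
--     x1 = max(xs)
--     y0 = min(ys)
--     y1 = max(ys)
--     for x in range(x0, x1+1):
--         if (y0,x) not in tiles:
--             return False
--         if (y1,x) not in tiles:
--             return False
--     for y in range(y0, y1+1):
--         if (y,x0) not in tiles:
--             return False
--         if (y,x1) not in tiles:
--             return False
--     return True
-- ===== SOURCE B (Python) =====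
-- def is_contained_inside_red_and_green(t1, t2, tiles):
--     # Quantifier flip: a single pass over the tiles collects the distinct border
--     # cells present, and the answer is a cardinality comparison against the
--     # closed-form size of the rectangle's border (no border cell is ever enumerated).
--     x0, x1 = min(t1[1], t2[1]), max(t1[1], t2[1])
--     y0, y1 = min(t1[0], t2[0]), max(t1[0], t2[0])
--     found = {(y, x) for (y, x) in tiles
--              if y0 <= y <= y1 and x0 <= x <= x1
--              and (y == y0 or y == y1 or x == x0 or x == x1)}
--     w = x1 - x0 + 1
--     h = y1 - y0 + 1
--     return len(found) == w * h - max(w - 2, 0) * max(h - 2, 0)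
-- ===== Notes on version B (the rewrite author's own statement) =====
-- stated objective: alternative
-- what changed: Quantifier flip: instead of A's enumeration of every border coordinate with a membership scan of tiles per cell, B makes a single pass over the tiles collecting the distinct border cells present and compares that count to the closed-form cardinality of the rectangle border w*h - max(w-2,0)*max(h-2,0); no border cell is ever enumerated.
import Mathlib
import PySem

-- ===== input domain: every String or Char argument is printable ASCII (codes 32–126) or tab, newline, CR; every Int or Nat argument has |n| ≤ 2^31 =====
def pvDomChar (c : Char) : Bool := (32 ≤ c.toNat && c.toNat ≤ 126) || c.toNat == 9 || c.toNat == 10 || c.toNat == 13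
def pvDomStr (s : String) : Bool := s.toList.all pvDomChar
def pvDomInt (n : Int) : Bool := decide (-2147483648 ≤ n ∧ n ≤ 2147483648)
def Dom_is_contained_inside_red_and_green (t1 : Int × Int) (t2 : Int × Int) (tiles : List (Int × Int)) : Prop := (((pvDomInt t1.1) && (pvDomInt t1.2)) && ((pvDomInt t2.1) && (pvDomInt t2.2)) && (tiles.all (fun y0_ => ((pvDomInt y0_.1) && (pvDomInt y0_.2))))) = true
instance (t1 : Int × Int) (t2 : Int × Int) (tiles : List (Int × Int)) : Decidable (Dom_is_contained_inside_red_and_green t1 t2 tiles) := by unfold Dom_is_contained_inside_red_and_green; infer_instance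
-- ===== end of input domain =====

-- B flips the quantifier: one pass over tiles collects the distinct border cells present,
-- and the answer is a cardinality comparison against the closed-form border size.

-- ===== PORT A =====
-- second loop of A: for y in range(y0, y1+1): check (y,x0) and (y,x1)
-- (the loop is transcribed as a recursion on the running index, one iteration per step,
--  so the early 'return False' is exact even on huge ranges)
def pvLoopA2 (y1 x0 x1 : Int) (tiles : List (Int × Int)) (y : Int) : Bool :=
  if _h : y < y1 + 1 then
    if ¬ tiles.contains (y, x0) then false
    else if ¬ tiles.contains (y, x1) then false
    else pvLoopA2 y1 x0 x1 tiles (y + 1)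
  else true
termination_by (y1 + 1 - y).toNat
decreasing_by omega

-- first loop of A: for x in range(x0, x1+1): check (y0,x) and (y1,x); then fall through to loop 2
def pvLoopA1 (y0 y1 x1 x0' x1' : Int) (tiles : List (Int × Int)) (x : Int) : Bool :=
  if _h : x < x1 + 1 then
    if ¬ tiles.contains (y0, x) then false
    else if ¬ tiles.contains (y1, x) then false
    else pvLoopA1 y0 y1 x1 x0' x1' tiles (x + 1)
  else pvLoopA2 y1 x0' x1' tiles y0
termination_by (x1 + 1 - x).toNat
decreasing_by omega

def is_contained_inside_red_and_green (t1 : Int × Int) (t2 : Int × Int) (tiles : List (Int × Int)) : Bool :=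
  let xs := (t1.2, t2.2)
  let ys := (t1.1, t2.1)
  let x0 := min xs.1 xs.2
  let x1 := max xs.1 xs.2
  let y0 := min ys.1 ys.2
  let y1 := max ys.1 ys.2
  pvLoopA1 y0 y1 x1 x0 x1 tiles x0

-- ===== PORT B =====
def is_contained_inside_red_and_green_alt (t1 : Int × Int) (t2 : Int × Int) (tiles : List (Int × Int)) : Bool :=
  let x0 := min t1.2 t2.2
  let x1 := max t1.2 t2.2
  let y0 := min t1.1 t2.1
  let y1 := max t1.1 t2.1
  -- set comprehension over tiles: the distinct border cells that are present
  let found : PySem.Set (Int × Int) :=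
    PySem.Set.ofList (tiles.filter (fun c =>
      decide (y0 ≤ c.1) && decide (c.1 ≤ y1) && decide (x0 ≤ c.2) && decide (c.2 ≤ x1) &&
      (c.1 == y0 || c.1 == y1 || c.2 == x0 || c.2 == x1)))
  let w := x1 - x0 + 1
  let h := y1 - y0 + 1
  (found.length : Int) == w * h - max (w - 2) 0 * max (h - 2) 0

-- ===== PRECONDITION & SPEC =====
def Spec_is_contained_inside_red_and_green (t1 : Int × Int) (t2 : Int × Int) (tiles : List (Int × Int)) (out : Bool) : Prop := out = is_contained_inside_red_and_green_alt t1 t2 tiles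
instance (t1 : Int × Int) (t2 : Int × Int) (tiles : List (Int × Int)) (out : Bool) : Decidable (Spec_is_contained_inside_red_and_green t1 t2 tiles out) := by unfold Spec_is_contained_inside_red_and_green; infer_instance

-- ===== CLAIM (what is proved, stated in full; the proofs are below) =====
def Claim_equal_is_contained_inside_red_and_green : Prop := ∀ (t1 : Int × Int) (t2 : Int × Int) (tiles : List (Int × Int)), Dom_is_contained_inside_red_and_green t1 t2 tiles → Spec_is_contained_inside_red_and_green t1 t2 tiles (is_contained_inside_red_and_green t1 t2 tiles)

-- ===== LEMMAS AND PROOFS =====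

-- the rectangle border as a finite set of cells (proof-only helper)
noncomputable def pvBorder (y0 y1 x0 x1 : Int) : Finset (Int × Int) :=
  (Finset.Icc y0 y1 ×ˢ Finset.Icc x0 x1) \ (Finset.Icc (y0+1) (y1-1) ×ˢ Finset.Icc (x0+1) (x1-1))

theorem pvMem_border (y0 y1 x0 x1 : Int) (c : Int × Int) :
    c ∈ pvBorder y0 y1 x0 x1 ↔
      y0 ≤ c.1 ∧ c.1 ≤ y1 ∧ x0 ≤ c.2 ∧ c.2 ≤ x1 ∧
        (c.1 = y0 ∨ c.1 = y1 ∨ c.2 = x0 ∨ c.2 = x1) := by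
  simp only [pvBorder, Finset.mem_sdiff, Finset.mem_product, Finset.mem_Icc]
  omega

theorem pvBorder_card (y0 y1 x0 x1 : Int) (hy : y0 ≤ y1) (hx : x0 ≤ x1) :
    ((pvBorder y0 y1 x0 x1).card : Int)
      = (x1 - x0 + 1) * (y1 - y0 + 1)
          - max (x1 - x0 + 1 - 2) 0 * max (y1 - y0 + 1 - 2) 0 := by
  have hsub : (Finset.Icc (y0+1) (y1-1) ×ˢ Finset.Icc (x0+1) (x1-1))
      ⊆ (Finset.Icc y0 y1 ×ˢ Finset.Icc x0 x1) :=
    Finset.product_subset_product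
      (Finset.Icc_subset_Icc (by omega) (by omega))
      (Finset.Icc_subset_Icc (by omega) (by omega))
  have hle := Finset.card_le_card hsub
  rw [pvBorder, Finset.card_sdiff_of_subset hsub]
  rw [Finset.card_product, Finset.card_product] at *
  rw [Nat.cast_sub hle]
  push_cast
  rw [Int.card_Icc, Int.card_Icc, Int.card_Icc, Int.card_Icc]
  rw [Int.toNat_of_nonneg (by omega : (0:Int) ≤ y1 + 1 - y0),
      Int.toNat_of_nonneg (by omega : (0:Int) ≤ x1 + 1 - x0)]
  have e1 : ((y1 - 1 + 1 - (y0 + 1)).toNat : Int) = max (y1 - y0 + 1 - 2) 0 := by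
    rw [Int.toNat_eq_max]; omega
  have e2 : ((x1 - 1 + 1 - (x0 + 1)).toNat : Int) = max (x1 - x0 + 1 - 2) 0 := by
    rw [Int.toNat_eq_max]; omega
  rw [e1, e2]; ring

theorem pvLoopA2_eq (y1 x0 x1 : Int) (tiles : List (Int × Int)) (y : Int) :
    pvLoopA2 y1 x0 x1 tiles y
      = (PySem.List.pyRange y (y1 + 1) 1).all
          (fun y' => tiles.contains (y', x0) && tiles.contains (y', x1)) := by
  fun_induction pvLoopA2 y1 x0 x1 tiles y with
  | case1 y h h0 => rw [PySem.List.pyRange_one_cons h]; simp_all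
  | case2 y h h0 h1 => rw [PySem.List.pyRange_one_cons h]; simp_all
  | case3 y h h0 h1 ih => rw [PySem.List.pyRange_one_cons h]; simp_all
  | case4 y h => rw [PySem.List.pyRange_one_eq_nil (by omega)]; rfl

theorem pvLoopA1_eq (y0 y1 x1 x0' x1' : Int) (tiles : List (Int × Int)) (x : Int) :
    pvLoopA1 y0 y1 x1 x0' x1' tiles x
      = ((PySem.List.pyRange x (x1 + 1) 1).all
            (fun x' => tiles.contains (y0, x') && tiles.contains (y1, x'))
          && pvLoopA2 y1 x0' x1' tiles y0) := by
  fun_induction pvLoopA1 y0 y1 x1 x0' x1' tiles x with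
  | case1 x h h0 => rw [PySem.List.pyRange_one_cons h]; simp_all
  | case2 x h h0 h1 => rw [PySem.List.pyRange_one_cons h]; simp_all
  | case3 x h h0 h1 ih => rw [PySem.List.pyRange_one_cons h]; simp_all
  | case4 x h => rw [PySem.List.pyRange_one_eq_nil (by omega)]; simp

-- ===== VERDICT (by name: the statement is the Claim_ definition above) =====
theorem is_contained_inside_red_and_green_spec : Claim_equal_is_contained_inside_red_and_green := by
  intro t1 t2 tiles _
  unfold Spec_is_contained_inside_red_and_green
  unfold is_contained_inside_red_and_green is_contained_inside_red_and_green_alt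
  simp only [pvLoopA1_eq, pvLoopA2_eq]
  set x0 := min t1.2 t2.2 with hx0
  set x1 := max t1.2 t2.2 with hx1
  set y0 := min t1.1 t2.1 with hy0
  set y1 := max t1.1 t2.1 with hy1
  have hxle : x0 ≤ x1 := min_le_max
  have hyle : y0 ≤ y1 := min_le_max
  set p : Int × Int → Bool := fun c =>
      decide (y0 ≤ c.1) && decide (c.1 ≤ y1) && decide (x0 ≤ c.2) && decide (c.2 ≤ x1) &&
      (c.1 == y0 || c.1 == y1 || c.2 == x0 || c.2 == x1) with hp
  set B := pvBorder y0 y1 x0 x1 with hB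
  have hpmem : ∀ c, p c = true ↔ c ∈ B := by
    intro c
    rw [hB, pvMem_border, hp]
    simp only [Bool.and_eq_true, Bool.or_eq_true, decide_eq_true_eq, beq_iff_eq]
    tauto
  -- the found set: nodup list whose toFinset is the present border cells
  have hnd : (PySem.Set.ofList (tiles.filter p)).Nodup := PySem.Set.nodup_ofList _
  have hfin : (PySem.Set.ofList (tiles.filter p)).toFinset = B.filter (· ∈ tiles) := by
    ext c
    simp only [List.mem_toFinset, PySem.Set.mem_ofList, List.mem_filter, Finset.mem_filter]
    rw [hpmem c]
    tauto
  have hlen : ((PySem.Set.ofList (tiles.filter p)).length : Int)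
      = ((B.filter (· ∈ tiles)).card : Int) := by
    rw [← hfin, List.toFinset_card_of_nodup hnd]
  rw [Bool.eq_iff_iff]
  simp only [beq_iff_eq, Bool.and_eq_true, List.all_eq_true, Bool.and_eq_true,
    List.contains_iff_mem]
  rw [hlen, ← pvBorder_card y0 y1 x0 x1 hyle hxle, ← hB, Int.natCast_inj]
  have hfsub : B.filter (· ∈ tiles) ⊆ B := Finset.filter_subset _ _
  constructor
  · -- A true → counts equal
    rintro ⟨h1, h2⟩
    have hBsub : ∀ c ∈ B, c ∈ tiles := by
      intro c hc
      rw [hB, pvMem_border] at hc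
      obtain ⟨hyl, hyr, hxl, hxr, hcase⟩ := hc
      rcases hcase with h | h | h | h
      · have := (h1 c.2 (by rw [PySem.List.mem_pyRange_one]; omega)).1
        rw [← h] at this; simpa using this
      · have := (h1 c.2 (by rw [PySem.List.mem_pyRange_one]; omega)).2
        rw [← h] at this; simpa using this
      · have := (h2 c.1 (by rw [PySem.List.mem_pyRange_one]; omega)).1
        rw [← h] at this; simpa using this
      · have := (h2 c.1 (by rw [PySem.List.mem_pyRange_one]; omega)).2
        rw [← h] at this; simpa using this
    have : B.filter (· ∈ tiles) = B := Finset.filter_eq_self.mpr hBsub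
    rw [this]
  · -- counts equal → A true
    intro hcard
    have heq : B.filter (· ∈ tiles) = B :=
      Finset.eq_of_subset_of_card_le hfsub (le_of_eq hcard.symm)
    have hBsub : ∀ c ∈ B, c ∈ tiles := fun c hc => (Finset.mem_filter.mp (heq ▸ hc)).2
    refine ⟨fun x hxm => ?_, fun y hym => ?_⟩
    · rw [PySem.List.mem_pyRange_one] at hxm
      exact ⟨hBsub (y0, x) (by rw [hB, pvMem_border]; simp; omega),
             hBsub (y1, x) (by rw [hB, pvMem_border]; simp; omega)⟩
    · rw [PySem.List.mem_pyRange_one] at hym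
      exact ⟨hBsub (y, x0) (by rw [hB, pvMem_border]; simp; omega),
             hBsub (y, x1) (by rw [hB, pvMem_border]; simp; omega)⟩
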